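-- pv_equiv track=rewrite | github.com/InAnimaTe/zfs-recordsize-suggester | zfs-recordsize-suggester.py | simulate_zfs_allocation
-- ===== SOURCE A (Python) =====
-- def simulate_zfs_allocation(file_size, candidate_bytes):
--     if file_size == 0:
--         return 0
--     if file_size >= candidate_bytes:
--         blocks = (file_size + candidate_bytes - 1) // candidate_bytes
--         return blocks * candidate_bytes
--     else:
--         alloc = 512
--         while alloc < file_size and alloc < candidate_bytes:
--             alloc *= 2
--         return alloc
-- ===== SOURCE B (Python) =====
-- def simulate_zfs_allocation(file_size, candidate_bytes):
--     if file_size == 0: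
--         return 0
--     if file_size >= candidate_bytes:
--         blocks = (file_size + candidate_bytes - 1) // candidate_bytes
--         return blocks * candidate_bytes
--     # closed form: smallest 512*2^k >= file_size (the candidate_bytes bound
--     # never binds here since file_size < candidate_bytes)
--     if file_size <= 512:
--         return 512
--     return 1 << (file_size - 1).bit_length()
-- ===== Notes on version B (the rewrite author's own statement) =====
-- stated objective: idiomatic
-- what changed: The doubling while-loop of the else branch is replaced by a closed-form power of two via int.bit_length (1 << (file_size-1).bit_length(), floored at 512), removing the loop entirely.
import Mathlib
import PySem

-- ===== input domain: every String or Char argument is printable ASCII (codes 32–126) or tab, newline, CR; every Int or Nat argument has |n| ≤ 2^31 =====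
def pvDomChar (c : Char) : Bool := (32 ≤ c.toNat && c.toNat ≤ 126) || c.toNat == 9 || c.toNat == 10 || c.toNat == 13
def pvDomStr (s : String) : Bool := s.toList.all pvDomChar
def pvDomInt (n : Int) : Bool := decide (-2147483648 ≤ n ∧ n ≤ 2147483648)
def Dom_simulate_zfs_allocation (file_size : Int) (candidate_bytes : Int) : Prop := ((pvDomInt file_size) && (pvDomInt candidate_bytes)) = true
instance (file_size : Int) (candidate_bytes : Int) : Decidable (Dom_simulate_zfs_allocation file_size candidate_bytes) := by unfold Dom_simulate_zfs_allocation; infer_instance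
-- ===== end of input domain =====

-- B replaces A's doubling while-loop with a closed-form power of two via bit_length (same values; no speed claim).


-- ===== PORT A =====
-- the while loop: alloc doubles while alloc < file_size and alloc < candidate_bytes
def allocLoop (file_size candidate_bytes alloc : Int) (h : 0 < alloc) : Int :=
  if alloc < file_size ∧ alloc < candidate_bytes then
    allocLoop file_size candidate_bytes (alloc * 2) (by omega)
  else alloc
termination_by (file_size - alloc).toNat
decreasing_by omega

def simulate_zfs_allocation (file_size : Int) (candidate_bytes : Int) : Int :=
  if file_size = 0 then 0
  else if file_size ≥ candidate_bytes then
    let blocks := PySem.Int.floordiv (file_size + candidate_bytes - 1) candidate_bytes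
    blocks * candidate_bytes
  else
    allocLoop file_size candidate_bytes 512 (by omega)

-- ===== PORT B =====
def simulate_zfs_allocation_alt (file_size : Int) (candidate_bytes : Int) : Int :=
  if file_size = 0 then 0
  else if file_size ≥ candidate_bytes then
    let blocks := PySem.Int.floordiv (file_size + candidate_bytes - 1) candidate_bytes
    blocks * candidate_bytes
  else if file_size ≤ 512 then 512
  else (2 : Int) ^ PySem.Int.bitLength (file_size - 1)   -- 1 << (file_size - 1).bit_length()

-- ===== PRECONDITION & SPEC =====
-- Pre_ excludes exactly the inputs on which A raises ZeroDivisionError (candidate_bytes = 0 with 0 < file_size).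
def Pre_simulate_zfs_allocation (file_size : Int) (candidate_bytes : Int) : Prop :=
  ¬ (candidate_bytes = 0 ∧ 0 < file_size)
instance (file_size : Int) (candidate_bytes : Int) : Decidable (Pre_simulate_zfs_allocation file_size candidate_bytes) := by
  unfold Pre_simulate_zfs_allocation; infer_instance

def pvWitness_simulate_zfs_allocation : Int × Int := (300000, 4096)

def Spec_simulate_zfs_allocation (file_size : Int) (candidate_bytes : Int) (out : Int) : Prop := out = simulate_zfs_allocation_alt file_size candidate_bytes
instance (file_size : Int) (candidate_bytes : Int) (out : Int) : Decidable (Spec_simulate_zfs_allocation file_size candidate_bytes out) := by unfold Spec_simulate_zfs_allocation; infer_instance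

-- ===== CLAIM (what is proved, stated in full; the proofs are below) =====
def Claim_equal_simulate_zfs_allocation : Prop := ∀ (file_size : Int) (candidate_bytes : Int), Dom_simulate_zfs_allocation file_size candidate_bytes → Pre_simulate_zfs_allocation file_size candidate_bytes → Spec_simulate_zfs_allocation file_size candidate_bytes (simulate_zfs_allocation file_size candidate_bytes)

-- ===== LEMMAS AND PROOFS =====

-- the loop, entered with alloc < file_size < candidate_bytes, returns alloc * 2^(k+1)
-- where k+1 is the least number of doublings reaching file_size
lemma allocLoop_pow :
    ∀ (n : Nat) (fs cb alloc : Int) (h : 0 < alloc), (fs - alloc).toNat ≤ n → fs < cb → alloc < fs →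
      ∃ k : Nat, allocLoop fs cb alloc h = alloc * 2 ^ (k + 1) ∧
        fs ≤ alloc * 2 ^ (k + 1) ∧ alloc * 2 ^ k < fs := by
  intro n
  induction n with
  | zero => intro fs cb alloc h hn hcb hlt; omega
  | succ n ih =>
    intro fs cb alloc h hn hcb hlt
    rw [allocLoop, if_pos ⟨hlt, by omega⟩]
    by_cases h2 : alloc * 2 < fs
    · obtain ⟨k, hk, hub, hlb⟩ := ih fs cb (alloc * 2) (by omega) (by omega) hcb h2
      refine ⟨k + 1, by rw [hk]; ring, ?_, ?_⟩
      · rw [show alloc * 2 ^ (k + 1 + 1) = alloc * 2 * 2 ^ (k + 1) by ring]; exact hub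
      · rw [show alloc * 2 ^ (k + 1) = alloc * 2 * 2 ^ k by ring]; exact hlb
    · rw [allocLoop, if_neg (by omega)]
      exact ⟨0, by ring, by omega, by omega⟩

lemma allocLoop_512 (fs cb : Int) (hcb : fs < cb) (hfs : 512 < fs) :
    allocLoop fs cb 512 (by omega) = (2 : Int) ^ PySem.Int.bitLength (fs - 1) := by
  obtain ⟨k, hk, hub, hlb⟩ :=
    allocLoop_pow (fs - 512).toNat fs cb 512 (by omega) le_rfl hcb hfs
  rw [hk]
  have hfn : fs - 1 = ((fs - 1).toNat : Int) := by omega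
  set N : Nat := (fs - 1).toNat with hN
  have hNpos : 0 < N := by omega
  -- bitLength of a positive Int equals Nat.size of its natAbs; use the two bound lemmas
  have hbu : (N : Int).natAbs < 2 ^ PySem.Int.bitLength (N : Int) :=
    PySem.Int.lt_two_pow_bitLength _
  have hbl : 2 ^ (PySem.Int.bitLength (N : Int) - 1) ≤ (N : Int).natAbs :=
    PySem.Int.two_pow_bitLength_le _ (by simp; omega)
  rw [hfn]
  set s := PySem.Int.bitLength (N : Int) with hs
  simp only [Int.natAbs_natCast] at hbu hbl
  -- fs = N + 1; bounds: N < 2^s, 2^(s-1) ≤ N; loop: N + 1 ≤ 512*2^(k+1), 512*2^k ≤ N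
  have hspos : 0 < s := by
    by_contra hc
    have : s = 0 := by omega
    rw [this] at hbu; simp at hbu; omega
  -- show s = k + 10
  have hub' : (N : Int) < 512 * 2 ^ (k + 1) := by omega
  have hlb' : (512 : Int) * 2 ^ k ≤ (N : Int) := by omega
  have hubn : N < 512 * 2 ^ (k + 1) := by exact_mod_cast hub'
  have hlbn : 512 * 2 ^ k ≤ N := by exact_mod_cast hlb'
  have h512 : (512 : Nat) * 2 ^ (k + 1) = 2 ^ (k + 10) := by ring
  have h512' : (512 : Nat) * 2 ^ k = 2 ^ (k + 9) := by ring
  have hs_le : s ≤ k + 10 := by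
    by_contra hc
    have : 2 ^ (k + 10) ≤ 2 ^ (s - 1) := Nat.pow_le_pow_right (by omega) (by omega)
    omega
  have hs_ge : k + 10 ≤ s := by
    by_contra hc
    have : 2 ^ s ≤ 2 ^ (k + 9) := Nat.pow_le_pow_right (by omega) (by omega)
    omega
  have : s = k + 10 := by omega
  rw [this]
  ring

-- ===== VERDICT (by name: the statement is the Claim_ definition above) =====
theorem simulate_zfs_allocation_spec : Claim_equal_simulate_zfs_allocation := by
  intro fs cb _ _
  unfold Spec_simulate_zfs_allocation simulate_zfs_allocation simulate_zfs_allocation_alt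
  by_cases h0 : fs = 0
  · simp [h0]
  · rw [if_neg h0, if_neg h0]
    by_cases hge : fs ≥ cb
    · rw [if_pos hge, if_pos hge]
    · rw [if_neg hge, if_neg hge]
      by_cases hle : fs ≤ 512
      · rw [if_pos hle, allocLoop, if_neg (by omega)]
      · rw [if_neg hle, allocLoop_512 fs cb (by omega) (by omega)]
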